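-- pv_equiv track=rewrite | github.com/mmishra4/DSA | Contest/MinOp.py | minOpCnt
-- ===== SOURCE A (Python) =====
-- def minOpCnt(A, B):
--     A.sort()
--     cnt = 0
--     if B in A:
--         for i in A:
--             if i> B:
--                 cnt += 1
--     if cnt>0:
--         return cnt
--     else:
--         return -1
-- ===== SOURCE B (Python) =====
-- from bisect import bisect_left, bisect_right
--
--
-- def minOpCnt(A, B):
--     # Sorts A in place like the original, then binary-searches instead of scanning.
--     A.sort()
--     lo = bisect_left(A, B)
--     present = lo < len(A) and A[lo] == B
--     cnt = len(A) - bisect_right(A, B)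
--     return cnt if present and cnt > 0 else -1
-- ===== Notes on version B (the rewrite author's own statement) =====
-- stated objective: alternative
-- what changed: After the (kept, in-place) sort, B replaces the linear membership test and the element-by-element counting loop with two binary searches: bisect_left decides whether B is present and len(A) - bisect_right counts the elements strictly greater than B; the O(n log n) sort dominates either way.
import Mathlib
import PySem

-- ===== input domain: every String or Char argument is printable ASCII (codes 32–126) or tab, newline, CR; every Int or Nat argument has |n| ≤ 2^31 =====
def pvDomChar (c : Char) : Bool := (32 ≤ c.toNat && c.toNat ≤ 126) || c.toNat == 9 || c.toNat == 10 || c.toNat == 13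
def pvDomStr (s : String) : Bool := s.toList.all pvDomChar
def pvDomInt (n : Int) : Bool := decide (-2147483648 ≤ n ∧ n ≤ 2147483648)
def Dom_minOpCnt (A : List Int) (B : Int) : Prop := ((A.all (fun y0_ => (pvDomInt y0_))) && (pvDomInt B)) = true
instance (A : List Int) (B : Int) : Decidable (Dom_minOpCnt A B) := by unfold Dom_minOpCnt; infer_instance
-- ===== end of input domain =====

-- ===== PORT A =====
-- B changes only the search: A scans the sorted list, B binary-searches it (objective: alternative; the sort dominates the cost either way).
-- Both versions sort A in place in Python; the equivalence proved here is about the return value.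
def minOpCnt (A : List Int) (B : Int) : Int :=
  let As := PySem.List.sorted A (fun x => x)   -- A.sort()
  let cnt : Int :=
    if B ∈ As then                             -- if B in A
      As.foldl (fun c i => if B < i then c + 1 else c) 0   -- for i in A: if i > B: cnt += 1
    else 0
  if cnt > 0 then cnt else -1

-- ===== PORT B =====
def minOpCnt_alt (A : List Int) (B : Int) : Int :=
  let As := PySem.List.sorted A (fun x => x)   -- A.sort()
  let lo := PySem.List.bisectLeft As B         -- bisect_left(A, B)
  -- A[lo]: in Python only evaluated when lo < len(A) (short-circuit `and`); getD is exact there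
  let present : Bool := decide (lo < As.length) && (As.getD lo 0 == B)
  let cnt : Nat := As.length - PySem.List.bisectRight As B   -- len(A) - bisect_right(A, B)
  if present && decide (0 < cnt) then (cnt : Int) else -1

-- ===== PRECONDITION & SPEC =====
def Spec_minOpCnt (A : List Int) (B : Int) (out : Int) : Prop := out = minOpCnt_alt A B
instance (A : List Int) (B : Int) (out : Int) : Decidable (Spec_minOpCnt A B out) := by unfold Spec_minOpCnt; infer_instance

-- ===== CLAIM (what is proved, stated in full; the proofs are below) =====
def Claim_equal_minOpCnt : Prop := ∀ (A : List Int) (B : Int), Dom_minOpCnt A B → Spec_minOpCnt A B (minOpCnt A B)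

-- ===== LEMMAS AND PROOFS =====

-- On a ≤-sorted list, len - bisect_right is the number of elements strictly greater than x.
theorem sub_bisectRight_eq_countGt (S : List Int) (x : Int)
    (hs : List.Pairwise (fun a b => a ≤ b) S) :
    S.length - PySem.List.bisectRight S x = S.countP (fun i => decide (x < i)) := by
  obtain ⟨hle, hlt, hgt⟩ := PySem.List.bisectRight_spec S x hs
  set k := PySem.List.bisectRight S x with hk
  have hsplit : S.countP (fun i => decide (x < i))
      = (S.take k).countP (fun i => decide (x < i)) + (S.drop k).countP (fun i => decide (x < i)) := by
    rw [← List.countP_append, List.take_append_drop]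
  have h1 : (S.take k).countP (fun i => decide (x < i)) = 0 := by
    rw [List.countP_eq_zero]
    intro a ha
    obtain ⟨i, hi, rfl⟩ := List.mem_iff_getElem.mp ha
    rw [List.getElem_take]
    have hik : i < k := by
      have := hi; rw [List.length_take] at this; omega
    have hiS : i < S.length := by
      have := hi; rw [List.length_take] at this; omega
    simpa using not_lt.mpr (hlt i hiS hik)
  have h2 : (S.drop k).countP (fun i => decide (x < i)) = (S.drop k).length := by
    rw [List.countP_eq_length]
    intro a ha
    obtain ⟨i, hi, rfl⟩ := List.mem_iff_getElem.mp ha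
    rw [List.getElem_drop]
    have hiS : k + i < S.length := by
      have := hi; rw [List.length_drop] at this; omega
    simpa using hgt (k + i) hiS (by omega)
  rw [hsplit, h1, h2, List.length_drop]
  omega

-- On a ≤-sorted list, membership of x is exactly the bisect_left probe.
theorem mem_iff_probe (S : List Int) (x : Int) (k : Nat)
    (hs : List.Pairwise (fun a b => a ≤ b) S)
    (hlt : ∀ (j : Nat) (hj : j < S.length), j < k → S[j] < x)
    (hgt : ∀ (j : Nat) (hj : j < S.length), k ≤ j → x ≤ S[j]) :
    x ∈ S ↔ (k < S.length ∧ S.getD k 0 = x) := by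
  constructor
  · intro hx
    obtain ⟨i, hi, rfl⟩ := List.mem_iff_getElem.mp hx
    have hki : k ≤ i := by
      by_contra h
      exact absurd (hlt i hi (by omega)) (lt_irrefl _)
    have hkS : k < S.length := lt_of_le_of_lt hki hi
    refine ⟨hkS, ?_⟩
    rw [List.getD_eq_getElem _ _ hkS]
    have h1 : S[i] ≤ S[k] := hgt k hkS (le_refl k)
    have h2 : S[k] ≤ S[i] := by
      rcases Nat.lt_or_ge k i with h | h
      · exact (List.pairwise_iff_getElem.mp hs) k i hkS hi h
      · have hki' : k = i := by omega
        subst hki'; exact le_refl _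
    omega
  · intro hkv
    have hkS := hkv.1
    have hval := hkv.2
    rw [List.getD_eq_getElem _ _ hkS] at hval
    have hm := List.getElem_mem hkS
    rwa [hval] at hm

theorem mem_iff_bisectLeft (S : List Int) (x : Int)
    (hs : List.Pairwise (fun a b => a ≤ b) S) :
    x ∈ S ↔ (PySem.List.bisectLeft S x < S.length ∧ S.getD (PySem.List.bisectLeft S x) 0 = x) := by
  obtain ⟨hle, hlt, hgt⟩ := PySem.List.bisectLeft_spec S x hs
  exact mem_iff_probe S x _ hs hlt hgt

-- ===== VERDICT (by name: the statement is the Claim_ definition above) =====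
theorem minOpCnt_spec : Claim_equal_minOpCnt := by
  intro A B _
  unfold Spec_minOpCnt minOpCnt minOpCnt_alt
  set S := PySem.List.sorted A (fun x => x) with hS
  have hs : List.Pairwise (fun a b => a ≤ b) S := PySem.List.sorted_pairwise A (fun x => x)
  have hcnt := sub_bisectRight_eq_countGt S B hs
  have hmem := mem_iff_bisectLeft S B hs
  have hfold : List.foldl (fun c i => if B < i then c + 1 else c) 0 S
      = ((S.countP (fun i => decide (B < i)) : Nat) : Int) := by
    simpa using PySem.List.foldl_count_if (fun i => decide (B < i)) S 0
  by_cases hB : B ∈ S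
  · obtain ⟨hlo, hval⟩ := hmem.mp hB
    have hpres : (decide (PySem.List.bisectLeft S B < S.length)
        && (S.getD (PySem.List.bisectLeft S B) 0 == B)) = true := by
      rw [decide_eq_true hlo, beq_iff_eq.mpr hval]
      rfl
    simp only [if_pos hB, hfold, hpres, Bool.true_and, hcnt]
    rcases Nat.eq_zero_or_pos (S.countP (fun i => decide (B < i))) with h0 | h0
    · rw [h0]; norm_num
    · have hc : (0 : Int) < ((S.countP (fun i => decide (B < i)) : Nat) : Int) := by
        exact_mod_cast h0
      simp only [hc, if_pos]
      simp [h0]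
  · have hnp : ¬ (PySem.List.bisectLeft S B < S.length ∧ S.getD (PySem.List.bisectLeft S B) 0 = B) :=
      fun h => hB (hmem.mpr h)
    have hpres : (decide (PySem.List.bisectLeft S B < S.length)
        && (S.getD (PySem.List.bisectLeft S B) 0 == B)) = false := by
      by_cases h : PySem.List.bisectLeft S B < S.length
      · have h2 : S.getD (PySem.List.bisectLeft S B) 0 ≠ B := fun h2 => hnp ⟨h, h2⟩
        rw [beq_eq_false_iff_ne.mpr h2, Bool.and_false]
      · rw [decide_eq_false h, Bool.false_and]
    simp only [if_neg hB, hpres, Bool.false_and]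
    norm_num
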